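-- pv_equiv track=rewrite | github.com/paoloboldo/miry | generate_report.py | first_last_indices
-- ===== SOURCE A (Python) =====
-- def first_last_indices(array):
--     first_i = None
--     last_i = None
--     for i, value in enumerate(array):
--         if str(value) != "nan":
--             last_i = i
--             if first_i is None:
--                 first_i = i
--             continue
--         else:
--             if first_i is not None:
--                 break
--     return [first_i, last_i]
-- ===== SOURCE B (Python) =====
-- def first_last_indices(array):
--     first_i = None
--     for i, value in enumerate(array):
--         if str(value) != "nan":
--             first_i = i
--             break
--     if first_i is None:
--         return [None, None]
--     last_i = first_i
--     for j, value in enumerate(array[first_i + 1:], start=first_i + 1):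
--         if str(value) == "nan":
--             break
--         last_i = j
--     return [first_i, last_i]
-- ===== Notes on version B (the rewrite author's own statement) =====
-- stated objective: simpler
-- what changed: Replaces the single stateful pass juggling first_i/last_i/continue with two plain passes: one scan locating the first non-'nan' index (early return if none), then a walk over the remaining slice extending last_i until the first 'nan'.
import Mathlib
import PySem

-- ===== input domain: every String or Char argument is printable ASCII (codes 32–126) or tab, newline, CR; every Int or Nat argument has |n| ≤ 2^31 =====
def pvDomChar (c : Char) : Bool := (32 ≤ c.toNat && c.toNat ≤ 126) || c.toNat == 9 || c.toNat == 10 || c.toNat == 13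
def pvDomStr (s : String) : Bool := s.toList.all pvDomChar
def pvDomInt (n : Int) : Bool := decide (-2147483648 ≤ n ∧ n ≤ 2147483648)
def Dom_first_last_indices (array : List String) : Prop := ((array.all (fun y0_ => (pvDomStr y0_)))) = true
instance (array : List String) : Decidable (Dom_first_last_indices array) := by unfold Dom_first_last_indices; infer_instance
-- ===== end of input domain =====

-- B: two-pass decomposition (find first non-"nan", then extend over the slice to the first gap) instead of A's single stateful pass; simpler, same cost.


-- ===== PORT A =====
-- literal port of A: one pass, state (first_i, last_i), 'break' modelled by returning
def flA_loop : List String → Int → Option Int → Option Int → List (Option Int)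
  | [], _, first_i, last_i => [first_i, last_i]
  | value :: rest, i, first_i, last_i =>
    if value ≠ "nan" then
      flA_loop rest (i + 1) (if first_i.isNone then some i else first_i) (some i)
    else
      match first_i with
      | some _ => [first_i, last_i]   -- break
      | none => flA_loop rest (i + 1) first_i last_i

def first_last_indices (array : List String) : List (Option Int) :=
  flA_loop array 0 none none

-- ===== PORT B =====
-- first loop of B: find the index of the first non-"nan" value
def flB_find : List String → Int → Option Int
  | [], _ => none
  | value :: rest, i => if value ≠ "nan" then some i else flB_find rest (i + 1)

-- second loop of B: extend last_i over the slice, break at the first "nan"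
def flB_ext : List String → Int → Int → Int
  | [], _, last_i => last_i
  | value :: rest, j, last_i =>
    if value = "nan" then last_i else flB_ext rest (j + 1) j

def first_last_indices_alt (array : List String) : List (Option Int) :=
  match flB_find array 0 with
  | none => [none, none]
  | some first_i =>
      [some first_i,
       some (flB_ext (PySem.List.slice array (some (first_i + 1)) none) (first_i + 1) first_i)]

-- ===== PRECONDITION & SPEC =====
def Spec_first_last_indices (array : List String) (out : List (Option Int)) : Prop := out = first_last_indices_alt array
instance (array : List String) (out : List (Option Int)) : Decidable (Spec_first_last_indices array out) := by unfold Spec_first_last_indices; infer_instance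

-- ===== CLAIM (what is proved, stated in full; the proofs are below) =====
def Claim_equal_first_last_indices : Prop := ∀ (array : List String), Dom_first_last_indices array → Spec_first_last_indices array (first_last_indices array)

-- ===== LEMMAS AND PROOFS =====
-- after the first index is found, A's remaining loop computes exactly B's extension walk
theorem flA_after (xs : List String) : ∀ (i : Int) (f l : Int),
    flA_loop xs i (some f) (some l) = [some f, some (flB_ext xs i l)] := by
  induction xs with
  | nil => intro i f l; simp [flA_loop, flB_ext]
  | cons v rest ih =>
      intro i f l
      by_cases h : v = "nan" <;> simp [flA_loop, flB_ext, h, ih]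

-- nat-position version of B's first loop
def findPos : List String → Option Nat
  | [] => none
  | value :: rest => if value ≠ "nan" then some 0 else (findPos rest).map (· + 1)

theorem flB_find_eq (xs : List String) : ∀ (i : Int),
    flB_find xs i = (findPos xs).map (fun k => i + (k : Int)) := by
  induction xs with
  | nil => intro i; simp [flB_find, findPos]
  | cons v rest ih =>
      intro i
      by_cases h : v = "nan"
      · simp [flB_find, findPos, h, ih]
        cases findPos rest <;> simp [Option.map] <;> ring
      · simp [flB_find, findPos, h]

theorem flA_main (xs : List String) : ∀ (i : Int),
    flA_loop xs i none none =
      match findPos xs with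
      | none => [none, none]
      | some k => [some (i + (k : Int)),
                   some (flB_ext (xs.drop (k + 1)) (i + (k : Int) + 1) (i + (k : Int)))] := by
  induction xs with
  | nil => intro i; simp [flA_loop, findPos]
  | cons v rest ih =>
      intro i
      by_cases h : v = "nan"
      · have step : flA_loop (v :: rest) i none none = flA_loop rest (i + 1) none none := by
          simp [flA_loop, h]
        rw [step, ih (i + 1)]
        cases hf : findPos rest with
        | none => simp [findPos, h, hf]
        | some k =>
            have e1 : i + 1 + (k : Int) = i + ((k : Int) + 1) := by ring
            simp [findPos, h, hf, List.drop, e1]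
      · simp [flA_loop, findPos, h, flA_after]

-- ===== VERDICT (by name: the statement is the Claim_ definition above) =====
theorem first_last_indices_spec : Claim_equal_first_last_indices := by
  intro array _
  unfold Spec_first_last_indices first_last_indices first_last_indices_alt
  rw [flA_main array 0, flB_find_eq array 0]
  cases hf : findPos array with
  | none => simp
  | some k =>
      simp
      have h1 : ((k : Int) + 1) = ((k + 1 : Nat) : Int) := by push_cast; ring
      rw [h1, PySem.List.slice_from_natCast]
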